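-- pv_equiv track=rewrite | github.com/borzilleri/clipper | clipper/util.py | trim_list
-- ===== SOURCE A (Python) =====
-- from typing import Optional, List
--
-- def trim_list(l: List[str]) -> list:
--     start_idx = 0
--     skip = True
--     for item in l:
--         if len(item.strip()) == 0 and skip:
--             start_idx += 1
--         else:
--             skip = False
--     end_idx = len(l)
--     skip = True
--     for i in range(len(l)):
--         idx = len(l) - i - 1
--         if len(l[idx].strip()) == 0 and skip:
--             end_idx -= 1
--         else:
--             skip = False
--     return l[start_idx:end_idx]
-- ===== SOURCE B (Python) =====
-- def trim_list(l):
--     idx = [i for i, s in enumerate(l) if s.strip()]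
--     if not idx:
--         return []
--     return l[idx[0]:idx[-1] + 1]
-- ===== Notes on version B (the rewrite author's own statement) =====
-- stated objective: simpler
-- what changed: B builds the index list of non-blank elements in one enumerate pass and returns a single slice between its first and last entry, instead of A's two whole-list scans with skip flags maintaining start/end counters.
import Mathlib
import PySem

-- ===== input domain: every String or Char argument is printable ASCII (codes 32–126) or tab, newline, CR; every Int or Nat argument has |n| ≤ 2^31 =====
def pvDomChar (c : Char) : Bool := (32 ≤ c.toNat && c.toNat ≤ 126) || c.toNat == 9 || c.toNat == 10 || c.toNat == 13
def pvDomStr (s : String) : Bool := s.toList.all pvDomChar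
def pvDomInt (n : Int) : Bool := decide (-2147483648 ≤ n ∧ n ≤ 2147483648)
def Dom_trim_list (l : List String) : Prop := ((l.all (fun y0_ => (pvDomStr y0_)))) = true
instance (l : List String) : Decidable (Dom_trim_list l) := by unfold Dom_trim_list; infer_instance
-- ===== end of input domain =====

-- B trims leading/trailing blank strings via one enumerate pass collecting the non-blank
-- indices and a single slice between the first and last of them, instead of A's two
-- whole-list scans with skip flags (simpler decomposition, same cost).

-- ===== PORT A =====
-- the blank test 'len(item.strip()) == 0' used by A (B tests 's.strip()' truthiness = its negation)
def pvBlank (s : String) : Bool := PySem.Str.len (PySem.Str.strip s) == 0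

def trim_list (l : List String) : List String :=
  -- first loop: start_idx / skip over l
  let p1 : Int × Bool := l.foldl
    (fun st item => if pvBlank item && st.2 then (st.1 + 1, st.2) else (st.1, false))
    (0, true)
  -- second loop: end_idx / skip over range(len(l)), reading l[len(l)-i-1] (index always in range)
  let p2 : Int × Bool := (PySem.List.pyRange 0 (PySem.List.len l) 1).foldl
    (fun st i => if pvBlank (PySem.List.pyGetD l (PySem.List.len l - i - 1) "") && st.2
                 then (st.1 - 1, st.2) else (st.1, false))
    (PySem.List.len l, true)
  PySem.List.slice l (some p1.1) (some p2.1)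

-- ===== PORT B =====
-- idx = [i for i, s in enumerate(l) if s.strip()]
def trim_list_idx (l : List String) : List Int :=
  ((PySem.List.enumerate l 0).filter (fun p => !pvBlank p.2)).map (·.1)

def trim_list_alt (l : List String) : List String :=
  match trim_list_idx l with
  | [] => []
  | i0 :: _ =>   -- l[idx[0] : idx[-1] + 1]
    PySem.List.slice l (some i0) (some (PySem.List.pyGetD (trim_list_idx l) (-1) 0 + 1))

-- ===== PRECONDITION & SPEC =====
def Spec_trim_list (l : List String) (out : List String) : Prop := out = trim_list_alt l
instance (l : List String) (out : List String) : Decidable (Spec_trim_list l out) := by unfold Spec_trim_list; infer_instance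

-- ===== CLAIM (what is proved, stated in full; the proofs are below) =====
def Claim_equal_trim_list : Prop := ∀ (l : List String), Dom_trim_list l → Spec_trim_list l (trim_list l)

-- ===== LEMMAS AND PROOFS =====

-- A's skip-flag loop never changes the accumulator once the flag is down
theorem pvLoop_false (δ : Int) (l : List String) (m : Int) :
    l.foldl (fun (st : Int × Bool) s => if pvBlank s && st.2 then (st.1 + δ, st.2) else (st.1, false)) (m, false)
      = (m, false) := by
  induction l generalizing m with
  | nil => rfl
  | cons x xs ih =>
    rw [List.foldl_cons]
    have h1 : (if (pvBlank x && (false:Bool)) = true then ((m:Int) + δ, false) else (m, false)) = (m, false) := by simp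
    rw [h1]; exact ih m

-- A's skip-flag loop, for a general step δ: adds δ once per leading blank; flag = all blank
theorem pvLoop_char (δ : Int) (l : List String) (m : Int) :
    l.foldl (fun (st : Int × Bool) s => if pvBlank s && st.2 then (st.1 + δ, st.2) else (st.1, false)) (m, true)
      = (m + δ * ((l.takeWhile pvBlank).length : Int), l.all pvBlank) := by
  induction l generalizing m with
  | nil => simp
  | cons x xs ih =>
    rw [List.foldl_cons]
    by_cases hx : pvBlank x = true
    · have h1 : (if (pvBlank x && (true:Bool)) = true then ((m:Int) + δ, true) else (m, false)) = (m + δ, true) := by simp [hx]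
      rw [h1, ih]
      refine Prod.ext ?_ ?_
      · simp [hx]
        ring
      · simp [List.all_cons, hx]
    · have h1 : (if (pvBlank x && (true:Bool)) = true then ((m:Int) + δ, true) else (m, false)) = (m, false) := by simp [hx]
      rw [h1, pvLoop_false]
      simp [hx]

-- the second loop with its subtraction, via pvLoop_char at δ = -1
theorem pvLoop_sub (l : List String) (m : Int) :
    l.foldl (fun (st : Int × Bool) s => if pvBlank s && st.2 then (st.1 - 1, st.2) else (st.1, false)) (m, true)
      = (m - ((l.takeWhile pvBlank).length : Int), l.all pvBlank) := by
  have hf : (fun (st : Int × Bool) s => if pvBlank s && st.2 then (st.1 + (-1), st.2) else (st.1, false))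
      = (fun (st : Int × Bool) s => if pvBlank s && st.2 then (st.1 - 1, st.2) else (st.1, false)) := by
    funext st s; rw [sub_eq_add_neg]
  have h := pvLoop_char (-1) l m
  rw [hf] at h
  rw [h]
  refine Prod.ext ?_ rfl
  ring

-- A's range-indexed second loop is a fold over l.reverse
theorem pvLoop2_rev (l : List String) (g : Int × Bool → String → Int × Bool) (z : Int × Bool) :
    (PySem.List.pyRange 0 (PySem.List.len l) 1).foldl
      (fun st i => g st (PySem.List.pyGetD l (PySem.List.len l - i - 1) "")) z
      = l.reverse.foldl g z := by
  have hmap : (List.range l.length).map (fun (j : Nat) => PySem.List.pyGetD l ((l.length : Int) - (j:Int) - 1) "") = l.reverse := by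
    apply List.ext_getElem
    · simp
    · intro i h1 h2
      have hi : i < l.length := by simpa using h1
      simp only [List.getElem_map, List.getElem_range, List.getElem_reverse]
      have hcast : ((l.length : Int) - (i:Int) - 1) = ((l.length - 1 - i : Nat) : Int) := by omega
      rw [hcast, PySem.List.pyGetD_natCast, List.getD_eq_getElem?_getD,
        List.getElem?_eq_getElem (by omega)]
      rfl
  rw [PySem.List.len_eq, PySem.List.pyRange_zero_natCast, List.foldl_map, ← hmap, List.foldl_map]

-- a list that is not all blank has a non-blank element strictly after its blank prefix
theorem pvTake_lt (l : List String) (h : ¬ l.all pvBlank = true) :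
    (l.takeWhile pvBlank).length < l.length := by
  have hpre := List.takeWhile_prefix (p := pvBlank) (l := l)
  rcases lt_or_eq_of_le hpre.length_le with h1 | h1
  · exact h1
  · exfalso
    apply h
    have heq : l.takeWhile pvBlank = l := hpre.eq_of_length h1
    rw [List.all_eq_true]
    intro x hx
    exact List.mem_takeWhile_imp (heq ▸ hx)

-- B's index list, generalized over the enumerate start
def pvIdxAux (l : List String) (s : Int) : List Int :=
  ((PySem.List.enumerate l s).filter (fun p => !pvBlank p.2)).map (·.1)

theorem pvIdxAux_cons_blank (x : String) (xs : List String) (s : Int) (hx : pvBlank x = true) :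
    pvIdxAux (x :: xs) s = pvIdxAux xs (s + 1) := by
  simp [pvIdxAux, PySem.List.enumerate_cons, hx]

theorem pvIdxAux_cons_nonblank (x : String) (xs : List String) (s : Int) (hx : ¬ pvBlank x = true) :
    pvIdxAux (x :: xs) s = s :: pvIdxAux xs (s + 1) := by
  simp [pvIdxAux, PySem.List.enumerate_cons, hx]

theorem pvIdxAux_nil (l : List String) (s : Int) :
    pvIdxAux l s = [] ↔ l.all pvBlank = true := by
  induction l generalizing s with
  | nil => simp [pvIdxAux]
  | cons x xs ih =>
    by_cases hx : pvBlank x = true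
    · rw [pvIdxAux_cons_blank x xs s hx, List.all_cons, hx]
      simpa using ih (s+1)
    · rw [pvIdxAux_cons_nonblank x xs s hx, List.all_cons]
      simp [hx]

theorem pvIdxAux_head (l : List String) (s : Int) (h : ¬ l.all pvBlank = true) :
    (pvIdxAux l s).head? = some (s + ((l.takeWhile pvBlank).length : Int)) := by
  induction l generalizing s with
  | nil => simp at h
  | cons x xs ih =>
    by_cases hx : pvBlank x = true
    · have h' : ¬ xs.all pvBlank = true := fun hxs => h (by simp [List.all_cons, hx, hxs])
      rw [pvIdxAux_cons_blank x xs s hx, ih (s+1) h']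
      simp [hx]
      ring
    · rw [pvIdxAux_cons_nonblank x xs s hx]
      simp [hx]

theorem pvIdxAux_append (l₁ l₂ : List String) (s : Int) :
    pvIdxAux (l₁ ++ l₂) s = pvIdxAux l₁ s ++ pvIdxAux l₂ (s + l₁.length) := by
  simp [pvIdxAux, PySem.List.enumerate_append, List.filter_append]

theorem pvIdxAux_last (l : List String) (s : Int) (h : ¬ l.all pvBlank = true) :
    (pvIdxAux l s).getLast? = some (s + ((l.length - 1 - (l.reverse.takeWhile pvBlank).length : Nat) : Int)) := by
  induction l using List.reverseRecOn with
  | nil => simp at h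
  | append_singleton xs x ih =>
    rw [pvIdxAux_append]
    by_cases hx : pvBlank x = true
    · have h' : ¬ xs.all pvBlank = true := by
        intro hxs
        apply h
        rw [List.all_append, hxs, List.all_cons, hx]
        rfl
      have hone : pvIdxAux [x] (s + (xs.length : Int)) = [] := by
        simp [pvIdxAux, PySem.List.enumerate_cons, hx]
      rw [hone, List.append_nil, ih h']
      have hrev : ((xs ++ [x]).reverse.takeWhile pvBlank).length
          = (xs.reverse.takeWhile pvBlank).length + 1 := by
        simp [List.reverse_append, hx]
      have h'' : ¬ xs.reverse.all pvBlank = true := by simpa using h'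
      have hrlt : (xs.reverse.takeWhile pvBlank).length < xs.length := by
        simpa using pvTake_lt xs.reverse h''
      simp only [Option.some.injEq, List.length_append, List.length_cons, List.length_nil]
      omega
    · have hone : pvIdxAux [x] (s + (xs.length : Int)) = [s + (xs.length : Int)] := by
        simp [pvIdxAux, PySem.List.enumerate_cons, hx]
      rw [hone, List.getLast?_concat]
      have hrev : ((xs ++ [x]).reverse.takeWhile pvBlank).length = 0 := by
        simp [List.reverse_append, hx]
      simp only [Option.some.injEq, List.length_append, List.length_cons, List.length_nil]
      omega

-- ===== VERDICT (by name: the statement is the Claim_ definition above) =====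
theorem trim_list_spec : Claim_equal_trim_list := by
  intro l _
  unfold Spec_trim_list trim_list
  simp only []
  rw [pvLoop_char 1 l 0,
      pvLoop2_rev l (fun st s => if pvBlank s && st.2 then (st.1 - 1, st.2) else (st.1, false))
        (PySem.List.len l, true),
      PySem.List.len_eq, pvLoop_sub]
  dsimp only
  rw [show ((0:Int) + 1 * ((List.takeWhile pvBlank l).length : Int))
        = ((List.takeWhile pvBlank l).length : Int) from by ring]
  by_cases hall : l.all pvBlank = true
  · -- all blank: A slices l[n:0] = [], B's index list is empty
    have hidx : trim_list_idx l = [] := (pvIdxAux_nil l 0).mpr hall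
    have htake : l.takeWhile pvBlank = l :=
      List.takeWhile_eq_self_iff.mpr (by intro x hx; exact (List.all_eq_true.mp hall) x hx)
    have htakerev : l.reverse.takeWhile pvBlank = l.reverse :=
      List.takeWhile_eq_self_iff.mpr (by intro x hx; exact (List.all_eq_true.mp hall) x (by simpa using hx))
    rw [trim_list_alt, hidx]
    simp only [htake, htakerev, List.length_reverse]
    rw [show ((l.length : Int) - (l.length : Int)) = ((0 : Nat) : Int) by ring,
        PySem.List.slice_natCast]
    simp
  · -- some non-blank element: both sides are the slice l[a : n - r]
    have hhead := pvIdxAux_head l 0 hall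
    have hrall : ¬ l.reverse.all pvBlank = true := by simpa using hall
    have hlast := pvIdxAux_last l 0 hall
    have hrlt : (l.reverse.takeWhile pvBlank).length < l.length := by
      simpa using pvTake_lt l.reverse hrall
    have hne : trim_list_idx l ≠ [] := fun hn => hall ((pvIdxAux_nil l 0).mp hn)
    rcases hcase : trim_list_idx l with _ | ⟨i0, rest⟩
    · exact absurd hcase hne
    · have hi0 : i0 = ((l.takeWhile pvBlank).length : Int) := by
        have : (trim_list_idx l).head? = some i0 := by rw [hcase]; rfl
        rw [show trim_list_idx l = pvIdxAux l 0 from rfl] at this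
        rw [hhead] at this
        have := Option.some.inj this
        omega
      have hne2 : (i0 :: rest) ≠ [] := by simp
      have hcase' : pvIdxAux l 0 = i0 :: rest := hcase
      rw [hcase'] at hlast
      have h2 := List.getLast?_eq_some_getLast hne2
      have hlv : (i0 :: rest).getLast hne2
          = ((l.length - 1 - (l.reverse.takeWhile pvBlank).length : Nat) : Int) := by
        have h3 := Option.some.inj (h2.symm.trans hlast)
        omega
      rw [trim_list_alt, hcase]
      simp only []
      rw [PySem.List.pyGetD_neg_one (i0 :: rest) 0 hne2, hlv, hi0]
      congr 2
      omega
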